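-- pv_equiv track=rewrite | github.com/ilitteri/6107-MatematicaDiscreta | codigos/relaciones_de_orden.py | cota_superior
-- ===== SOURCE A (Python) =====
-- def contenido(b, a):
--     contained = True
--     for i in b:
--         contained &= i in a
--     return contained
--
-- def cota_superior(b, a):
--     cota_sup = []
--     if contenido(b, a):
--         for c in a:
--             cota = True
--             for x in b:
--                 cota &= c % x == 0
--             if cota:
--                 cota_sup.append(c)
--     return cota_sup
-- ===== SOURCE B (Python) =====
-- def cota_superior(b, a):
--     sa = set(a)
--     for x in b:
--         if x not in sa:
--             return []
--     l = 1
--     for x in b: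
--         y, r = abs(x), l
--         while r:
--             y, r = r, y % r
--         l = abs(l * x) // y if y else 0
--     return [c for c in a if c % l == 0]
-- ===== Notes on version B (the rewrite author's own statement) =====
-- stated objective: faster
-- what changed: Instead of testing every candidate against every element of b (nested loops), B checks containment with one set, folds b once into a single lcm modulus via Euclid's algorithm, and keeps exactly the elements of a divisible by that lcm.
import Mathlib
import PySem

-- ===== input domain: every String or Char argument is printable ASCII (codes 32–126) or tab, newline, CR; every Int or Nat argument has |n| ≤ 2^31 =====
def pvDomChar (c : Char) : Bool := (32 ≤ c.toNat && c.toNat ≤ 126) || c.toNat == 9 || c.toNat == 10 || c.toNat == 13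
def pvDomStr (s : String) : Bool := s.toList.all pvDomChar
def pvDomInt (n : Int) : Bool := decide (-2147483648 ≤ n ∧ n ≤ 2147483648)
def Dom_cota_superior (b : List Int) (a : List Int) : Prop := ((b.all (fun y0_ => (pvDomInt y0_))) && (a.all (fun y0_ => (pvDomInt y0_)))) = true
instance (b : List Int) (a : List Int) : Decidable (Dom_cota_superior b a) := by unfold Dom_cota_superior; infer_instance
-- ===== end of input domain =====

-- B replaces A's nested membership/divisibility scans by one set and one lcm modulus: faster on large inputs.
-- ===== PORT A =====
def contenido (b : List Int) (a : List Int) : Bool :=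
  b.foldl (fun contained i => contained && a.contains i) true

def cota_superior (b : List Int) (a : List Int) : List Int :=
  if contenido b a then
    a.foldl (fun cota_sup c =>
      if b.foldl (fun cota x => cota && (PySem.Int.mod c x == 0)) true
      then cota_sup ++ [c] else cota_sup) []
  else []

-- ===== PORT B =====
-- the `while r: y, r = r, y % r` Euclid loop of Source B (arguments nonnegative there, so Nat.mod = Python %)
def pyEuclid (y r : Nat) : Nat :=
  if h : r = 0 then y else pyEuclid r (y % r)
termination_by r
decreasing_by exact Nat.mod_lt _ (Nat.pos_of_ne_zero h)

-- one iteration of Source B's lcm fold: `l = abs(l * x) // y if y else 0`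
def lcmStep (l x : Int) : Int :=
  let y := pyEuclid x.natAbs l.toNat
  if y ≠ 0 then PySem.Int.floordiv ((l * x).natAbs : Int) (y : Int) else 0

def cota_superior_alt (b : List Int) (a : List Int) : List Int :=
  let sa := PySem.Set.ofList a
  if b.all (fun x => PySem.Set.contains sa x) then
    let l := b.foldl lcmStep 1
    a.filter (fun c => PySem.Int.mod c l == 0)
  else []

-- ===== PRECONDITION & SPEC =====
-- Pre_ excludes exactly the inputs on which Python A raises ZeroDivisionError (c % 0 with 0 ∈ b,
-- b contained in a, a nonempty); B raises there too.
def Pre_cota_superior (b : List Int) (a : List Int) : Prop :=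
  ¬((0 : Int) ∈ b ∧ (∀ i ∈ b, i ∈ a) ∧ a ≠ [])
instance (b : List Int) (a : List Int) : Decidable (Pre_cota_superior b a) := by
  unfold Pre_cota_superior; infer_instance

def pvWitness_cota_superior : List Int × List Int := ([2, -3], [2, -3, 6, 7])

def Spec_cota_superior (b : List Int) (a : List Int) (out : List Int) : Prop := out = cota_superior_alt b a
instance (b : List Int) (a : List Int) (out : List Int) : Decidable (Spec_cota_superior b a out) := by unfold Spec_cota_superior; infer_instance

-- ===== CLAIM (what is proved, stated in full; the proofs are below) =====
def Claim_equal_cota_superior : Prop := ∀ (b : List Int) (a : List Int), Dom_cota_superior b a → Pre_cota_superior b a → Spec_cota_superior b a (cota_superior b a)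

-- ===== LEMMAS AND PROOFS =====

-- Python's `acc &= p(x)` loop is List.all
theorem foldl_and_eq_all (p : Int → Bool) (l : List Int) (acc : Bool) :
    l.foldl (fun c x => c && p x) acc = (acc && l.all p) := by
  induction l generalizing acc with
  | nil => simp
  | cons x xs ih => simp [List.foldl_cons, ih, Bool.and_assoc]

theorem pyEuclid_eq_gcd (y r : Nat) : pyEuclid y r = Nat.gcd r y := by
  induction y, r using pyEuclid.induct with
  | case1 y => rw [pyEuclid]; simp
  | case2 y r h ih =>
    rw [pyEuclid, dif_neg h, ih, Nat.gcd_rec r y]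

theorem lcmStep_eq_lcm (l x : Int) (hl : 0 ≤ l) : lcmStep l x = (Int.lcm l x : Int) := by
  unfold lcmStep
  have htn : l.toNat = l.natAbs := by omega
  rw [pyEuclid_eq_gcd, htn]
  by_cases hy : Nat.gcd l.natAbs x.natAbs = 0
  · have h0 : l.natAbs = 0 ∧ x.natAbs = 0 := Nat.gcd_eq_zero_iff.mp hy
    have hl0 : l = 0 := by omega
    have hx0 : x = 0 := by omega
    simp [hl0, hx0, Int.lcm]
  · simp only [hy, ne_eq, not_false_eq_true, if_true]
    rw [PySem.Int.floordiv_natCast]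
    unfold Int.lcm Nat.lcm
    rw [Int.natAbs_mul]
  -- faithfulness note: Source B's `abs(l*x) // y` on nonnegative ints is exactly Nat division (floordiv_natCast)

theorem fold_lcm_spec (b : List Int) (l0 : Int) (hl0 : 0 ≤ l0) :
    0 ≤ b.foldl lcmStep l0 ∧
      ∀ c : Int, (b.foldl lcmStep l0 ∣ c ↔ (l0 ∣ c ∧ ∀ x ∈ b, x ∣ c)) := by
  induction b generalizing l0 with
  | nil => exact ⟨hl0, fun c => by simp⟩
  | cons x xs ih =>
    rw [List.foldl_cons, lcmStep_eq_lcm l0 x hl0]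
    obtain ⟨h1, h2⟩ := ih ((Int.lcm l0 x : Int)) (Int.natCast_nonneg _)
    refine ⟨h1, fun c => ?_⟩
    rw [h2 c, Int.coe_lcm, lcm_dvd_iff]
    constructor
    · rintro ⟨⟨hl, hx⟩, hxs⟩
      refine ⟨hl, fun y hy => ?_⟩
      rcases List.mem_cons.mp hy with h | h
      · exact h ▸ hx
      · exact hxs y h
    · rintro ⟨hl, hall⟩
      exact ⟨⟨hl, hall x (by simp)⟩, fun y hy => hall y (by simp [hy])⟩

theorem ports_eq (b a : List Int) : cota_superior b a = cota_superior_alt b a := by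
  unfold cota_superior cota_superior_alt contenido
  have hcond : (b.foldl (fun contained i => contained && a.contains i) true)
      = b.all (fun x => PySem.Set.contains (PySem.Set.ofList a) x) := by
    rw [foldl_and_eq_all, Bool.true_and, Bool.eq_iff_iff]
    simp [List.all_eq_true, PySem.Set.mem_ofList]
  rw [hcond]
  by_cases hsub : b.all (fun x => PySem.Set.contains (PySem.Set.ofList a) x) = true
  · rw [if_pos hsub, if_pos hsub]
    rw [PySem.List.foldl_append_if_eq_filter]
    rw [List.nil_append]
    apply List.filter_congr
    intro c _
    rw [foldl_and_eq_all]
    simp only [Bool.true_and]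
    obtain ⟨-, hiff⟩ := fold_lcm_spec b 1 (by norm_num)
    rw [Bool.eq_iff_iff]
    simp only [List.all_eq_true, beq_iff_eq]
    constructor
    · intro h
      have hall : ∀ x ∈ b, x ∣ c := fun x hx => (PySem.Int.mod_eq_zero_iff_dvd c x).mp (h x hx)
      exact (PySem.Int.mod_eq_zero_iff_dvd c _).mpr ((hiff c).mpr ⟨one_dvd c, hall⟩)
    · intro h x hx
      have hL : (b.foldl lcmStep 1) ∣ c := (PySem.Int.mod_eq_zero_iff_dvd c _).mp h
      exact (PySem.Int.mod_eq_zero_iff_dvd c x).mpr (((hiff c).mp hL).2 x hx)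
  · rw [if_neg hsub, if_neg hsub]

-- ===== VERDICT (by name: the statement is the Claim_ definition above) =====
theorem cota_superior_spec : Claim_equal_cota_superior := by
  intro b a _ _
  unfold Spec_cota_superior
  exact ports_eq b a
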